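-- pv_equiv track=rewrite | github.com/pypi-data/pypi-mirror-403 | packages/skylos/skylos-3.1.2-py3-none-any.whl/skylos/config.py | get_all_ignore_lines
-- ===== SOURCE A (Python) =====
-- def get_all_ignore_lines(source):
--     ignore_lines = set()
--     in_ignore_block = False
--
--     for i, line in enumerate(source.splitlines(), start=1):
--         line_lower = line.lower()
--
--         if (
--             "# skylos: ignore-start" in line_lower
--             or "# skylos:ignore-start" in line_lower
--         ):
--             in_ignore_block = True
--             ignore_lines.add(i)
--             continue
--         elif (
--             "# skylos: ignore-end" in line_lower or "# skylos:ignore-end" in line_lower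
--         ):
--             in_ignore_block = False
--             ignore_lines.add(i)
--             continue
--         elif in_ignore_block:
--             ignore_lines.add(i)
--             continue
--
--         if any(
--             marker in line_lower
--             for marker in [
--                 "# skylos: ignore",
--                 "# skylos:ignore",
--                 "#skylos: ignore",
--                 "#skylos:ignore",
--                 "# noqa: skylos",
--                 "pragma: no skylos",
--                 "# noqa",
--                 "#noqa",
--             ]
--         ):
--             ignore_lines.add(i)
--             stripped = line.strip()
--             if stripped.startswith("@"):
--                 ignore_lines.add(i + 1)
--
--     return ignore_lines
-- ===== SOURCE B (Python) =====
-- def get_all_ignore_lines(source):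
--     lines = source.splitlines()
--     # pass 1: compute the in-block flag BEFORE each line (pure scan, no set yet)
--     flags = []
--     f = False
--     for line in lines:
--         flags.append(f)
--         ll = line.lower()
--         if "# skylos: ignore-start" in ll or "# skylos:ignore-start" in ll:
--             f = True
--         elif "# skylos: ignore-end" in ll or "# skylos:ignore-end" in ll:
--             f = False
--     markers = ["# skylos: ignore", "# skylos:ignore", "#skylos: ignore", "#skylos:ignore",
--                "# noqa: skylos", "pragma: no skylos", "# noqa", "#noqa"]
--     # pass 2: each line contributes its line numbers independently, given its flag
--     contribs = []
--     for i, (line, f) in enumerate(zip(lines, flags), start=1):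
--         ll = line.lower()
--         if ("# skylos: ignore-start" in ll or "# skylos:ignore-start" in ll
--                 or "# skylos: ignore-end" in ll or "# skylos:ignore-end" in ll or f):
--             contribs.append(i)
--         elif any(m in ll for m in markers):
--             contribs.append(i)
--             if line.strip().startswith("@"):
--                 contribs.append(i + 1)
--     return set(contribs)
-- ===== Notes on version B (the rewrite author's own statement) =====
-- stated objective: alternative
-- what changed: A's single stateful pass that mutates a set while toggling an in-block flag is split into a pure scan computing the flag before each line, then an independent per-line contribution pass whose results are collected into a set at the end.
import Mathlib
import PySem

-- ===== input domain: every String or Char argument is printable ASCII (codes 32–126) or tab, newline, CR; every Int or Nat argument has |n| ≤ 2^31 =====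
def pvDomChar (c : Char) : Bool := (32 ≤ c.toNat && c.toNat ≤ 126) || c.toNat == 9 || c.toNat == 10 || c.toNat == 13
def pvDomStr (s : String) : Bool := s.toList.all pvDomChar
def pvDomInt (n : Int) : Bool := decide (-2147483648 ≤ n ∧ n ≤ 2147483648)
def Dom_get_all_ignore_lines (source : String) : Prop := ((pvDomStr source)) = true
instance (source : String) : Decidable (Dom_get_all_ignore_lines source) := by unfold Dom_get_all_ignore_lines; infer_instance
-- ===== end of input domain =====

-- B changes the decomposition: one stateful pass mutating a set becomes a pure flag scan plus an
-- independent per-line contribution pass collected into a set at the end (objective: alternative).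

-- shared marker tests (the same string literals both Pythons contain)
def gailStart (ll : String) : Bool :=
  PySem.Str.isIn "# skylos: ignore-start" ll || PySem.Str.isIn "# skylos:ignore-start" ll
def gailEnd (ll : String) : Bool :=
  PySem.Str.isIn "# skylos: ignore-end" ll || PySem.Str.isIn "# skylos:ignore-end" ll
def gailMarkers : List String :=
  ["# skylos: ignore", "# skylos:ignore", "#skylos: ignore", "#skylos:ignore",
   "# noqa: skylos", "pragma: no skylos", "# noqa", "#noqa"]
def gailSingle (ll : String) : Bool := gailMarkers.any (fun m => PySem.Str.isIn m ll)
def gailDeco (line : String) : Bool := PySem.Str.startswith (PySem.Str.strip line) "@"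

-- ===== PORT A =====
def gailStep (st : PySem.Set Int × Bool) (p : Int × String) : PySem.Set Int × Bool :=
  let ll := PySem.Str.lower p.2
  if gailStart ll then
    (PySem.Set.add st.1 p.1, true)
  else if gailEnd ll then
    (PySem.Set.add st.1 p.1, false)
  else if st.2 then
    (PySem.Set.add st.1 p.1, st.2)
  else if gailSingle ll then
    let ignore := PySem.Set.add st.1 p.1
    if gailDeco p.2 then (PySem.Set.add ignore (p.1 + 1), st.2)
    else (ignore, st.2)
  else st

def get_all_ignore_lines (source : String) : List Int :=
  ((PySem.List.enumerate (PySem.Str.splitlines source) 1).foldl gailStep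
    (PySem.Set.empty, false)).1

-- ===== PORT B =====
-- pass 1: the in-block flag before each line
def gailFlags : List String → Bool → List Bool
  | [], _ => []
  | line :: rest, f =>
    let ll := PySem.Str.lower line
    f :: gailFlags rest (if gailStart ll then true else if gailEnd ll then false else f)

-- pass 2: the line numbers one line contributes, given its flag
def gailContrib (i : Int) (line : String) (f : Bool) : List Int :=
  let ll := PySem.Str.lower line
  if gailStart ll || gailEnd ll || f then [i]
  else if gailSingle ll then
    if gailDeco line then [i, i + 1] else [i]
  else []

def get_all_ignore_lines_alt (source : String) : List Int :=
  let lines := PySem.Str.splitlines source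
  PySem.Set.ofList
    (((PySem.List.enumerate lines 1).zip (gailFlags lines false)).flatMap
      (fun p => gailContrib p.1.1 p.1.2 p.2))

-- ===== PRECONDITION & SPEC =====
def Spec_get_all_ignore_lines (source : String) (out : List Int) : Prop := out = get_all_ignore_lines_alt source
instance (source : String) (out : List Int) : Decidable (Spec_get_all_ignore_lines source out) := by unfold Spec_get_all_ignore_lines; infer_instance

-- ===== CLAIM (what is proved, stated in full; the proofs are below) =====
def Claim_equal_get_all_ignore_lines : Prop := ∀ (source : String), Dom_get_all_ignore_lines source → Spec_get_all_ignore_lines source (get_all_ignore_lines source)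

-- ===== LEMMAS AND PROOFS =====

lemma gail_loop (lines : List String) : ∀ (i : Int) (flag : Bool) (acc : PySem.Set Int),
    ((PySem.List.enumerate lines i).foldl gailStep (acc, flag)).1
      = PySem.Set.update acc
          (((PySem.List.enumerate lines i).zip (gailFlags lines flag)).flatMap
            (fun p => gailContrib p.1.1 p.1.2 p.2)) := by
  induction lines with
  | nil => intro i flag acc; simp [PySem.List.enumerate_nil, gailFlags, PySem.Set.update]
  | cons l rest ih =>
    intro i flag acc
    simp only [PySem.List.enumerate_cons, gailFlags, List.zip_cons_cons, List.flatMap_cons,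
      List.foldl_cons]
    rw [PySem.Set.update, List.foldl_append, ← PySem.Set.update, ← PySem.Set.update]
    by_cases hs : gailStart (PySem.Str.lower l) = true
    · simp [gailStep, gailContrib, hs, ih, PySem.Set.update]
    · by_cases he : gailEnd (PySem.Str.lower l) = true
      · simp [gailStep, gailContrib, hs, he, ih, PySem.Set.update]
      · by_cases hf : flag = true
        · simp [gailStep, gailContrib, hs, he, hf, ih, PySem.Set.update]
        · by_cases hm : gailSingle (PySem.Str.lower l) = true
          · by_cases hd : gailDeco l = true
            · simp [gailStep, gailContrib, hs, he, hf, hm, hd, ih, PySem.Set.update]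
            · simp [gailStep, gailContrib, hs, he, hf, hm, hd, ih, PySem.Set.update]
          · simp [gailStep, gailContrib, hs, he, hf, hm, ih, PySem.Set.update]

-- ===== VERDICT (by name: the statement is the Claim_ definition above) =====
theorem get_all_ignore_lines_spec : Claim_equal_get_all_ignore_lines := by
  intro source _
  unfold Spec_get_all_ignore_lines get_all_ignore_lines get_all_ignore_lines_alt
  rw [gail_loop, PySem.Set.ofList_eq_foldl, PySem.Set.update]
  rfl
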